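-- pv_equiv track=rewrite | github.com/jeff87654/Lifting | monitor_s17.py | partitions_no_ones
-- ===== SOURCE A (Python) =====
-- def partitions_no_ones(n, max_part=None):
--     if max_part is None:
--         max_part = n
--     if n == 0:
--         return [()]
--     result = []
--     for i in range(min(n, max_part), 1, -1):
--         for rest in partitions_no_ones(n - i, i):
--             result.append((i,) + rest)
--     return result
-- ===== SOURCE B (Python) =====
-- def partitions_no_ones(n, max_part=None):
--     cap = n if max_part is None else max_part
--     result = []
--     stack = [(n, cap, ())]
--     while stack:
--         remaining, c, prefix = stack.pop()
--         if remaining == 0: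
--             result.append(prefix)
--         else:
--             for i in range(2, min(remaining, c) + 1):
--                 stack.append((remaining - i, i, prefix + (i,)))
--     return result
-- ===== Notes on version B (the rewrite author's own statement) =====
-- stated objective: alternative
-- what changed: Replaces A's recursion with an iterative depth-first search over an explicit stack of (remaining, cap, prefix) frames, pushing candidate parts in ascending order so LIFO popping reproduces A's descending-lex output order.
-- outside the precondition, e.g. on partitions_no_ones(16001, 2): A returns [], B returns []; on partitions_no_ones(30001, 2): A raises RecursionError, B returns []
import Mathlib
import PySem

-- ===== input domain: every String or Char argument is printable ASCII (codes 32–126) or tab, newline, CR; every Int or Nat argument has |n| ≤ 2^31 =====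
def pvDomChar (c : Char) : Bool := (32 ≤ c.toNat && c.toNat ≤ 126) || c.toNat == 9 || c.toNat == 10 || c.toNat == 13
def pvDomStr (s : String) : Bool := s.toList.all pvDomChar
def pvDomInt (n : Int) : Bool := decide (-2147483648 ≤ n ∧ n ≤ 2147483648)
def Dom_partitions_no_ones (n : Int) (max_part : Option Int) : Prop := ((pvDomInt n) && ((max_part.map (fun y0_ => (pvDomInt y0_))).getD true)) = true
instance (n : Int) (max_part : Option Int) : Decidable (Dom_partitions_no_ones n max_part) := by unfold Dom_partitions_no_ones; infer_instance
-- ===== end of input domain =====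

-- B replaces A's recursion by an iterative depth-first search over an explicit stack of
-- (remaining, cap, prefix) frames (objective: alternative; same output, same order).

-- ===== PORT A =====
-- literal port of A's recursion; `.attach` only carries the membership fact for termination
def partitions_no_ones (n : Int) (max_part : Option Int) : List (List Int) :=
  let mp := max_part.getD n
  if n = 0 then [[]]
  else
    (PySem.List.pyRange (min n mp) 1 (-1)).attach.foldl
      (fun result i =>
        (partitions_no_ones (n - i.1) (some i.1)).foldl
          (fun result rest => result ++ [i.1 :: rest]) result)
      []
termination_by n.toNat
decreasing_by
  have h := (PySem.List.mem_pyRange_neg_one).mp i.2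
  omega

-- ===== PORT B =====
-- weight of one stack frame; used only to hand pvDfs enough fuel (a totality guard)
def pvFuel (r c : Int) : Nat := if min r c ≤ 1 then 1 else 2 ^ (r.toNat + 1)

-- the DFS loop of Source B; the Lean list's HEAD is the Python stack's TOP (stack.pop() = pop the
-- head), so Python's ascending pushes of i = 2 .. min(remaining, c) become prepending that
-- range reversed; the popped/pushed frames and the emitted results are exactly Source B's.
-- `fuel` is only a structural-termination guard: partitions_no_ones_alt supplies more fuel
-- than the search can consume (proved in dfs_spec below), so the 0-fuel branch is never taken
def pvDfs (fuel : Nat) (stack : List (Int × Int × List Int)) (result : List (List Int)) : List (List Int) :=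
  match fuel, stack with
  | 0, _ => result
  | _ + 1, [] => result
  | fuel + 1, (r, c, p) :: rest =>
    if r = 0 then pvDfs fuel rest (result ++ [p])
    else
      pvDfs fuel (((PySem.List.pyRange 2 (min r c + 1) 1).reverse.map
        (fun i => (r - i, i, p ++ [i]))) ++ rest) result

def partitions_no_ones_alt (n : Int) (max_part : Option Int) : List (List Int) :=
  let cap := max_part.getD n
  pvDfs (pvFuel n cap + 1) [(n, cap, [])] []

-- ===== PRECONDITION & SPEC =====
-- Pre_ excludes inputs with n > 15000 and a non-empty part range (min(n, cap) ≥ 2): there A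
-- recurses to depth ≈ n/2 and raises RecursionError once that exceeds the interpreter's
-- recursion limit; 15000 leaves a safety margin below that limit, so on some excluded inputs
-- (small caps keep the branching trivial) A still returns and B returns the same value.
def Pre_partitions_no_ones (n : Int) (max_part : Option Int) : Prop :=
  min n (max_part.getD n) ≤ 1 ∨ n ≤ 15000
instance (n : Int) (max_part : Option Int) : Decidable (Pre_partitions_no_ones n max_part) := by unfold Pre_partitions_no_ones; infer_instance
def pvWitness_partitions_no_ones : Int × Option Int := (6, none)

def Spec_partitions_no_ones (n : Int) (max_part : Option Int) (out : List (List Int)) : Prop := out = partitions_no_ones_alt n max_part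
instance (n : Int) (max_part : Option Int) (out : List (List Int)) : Decidable (Spec_partitions_no_ones n max_part out) := by unfold Spec_partitions_no_ones; infer_instance

-- ===== CLAIM (what is proved, stated in full; the proofs are below) =====
def Claim_equal_partitions_no_ones : Prop := ∀ (n : Int) (max_part : Option Int), Dom_partitions_no_ones n max_part → Pre_partitions_no_ones n max_part → Spec_partitions_no_ones n max_part (partitions_no_ones n max_part)

-- ===== LEMMAS AND PROOFS =====

lemma flat_singleton {α β : Type} (L : List α) (f : α → β) :
    (L.map (fun y => [f y])).flatten = L.map f := by
  induction L with
  | nil => rfl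
  | cons a l ih => simp [ih]

-- A's recursion in plain foldl/map form
lemma A_eq (n : Int) (mp : Option Int) (h : n ≠ 0) :
    partitions_no_ones n mp =
      (PySem.List.pyRange (min n (mp.getD n)) 1 (-1)).foldl
        (fun result i => result ++ (partitions_no_ones (n - i) (some i)).map (fun rest => i :: rest)) [] := by
  rw [partitions_no_ones]
  simp [h, flat_singleton]

lemma A_zero (mp : Option Int) : partitions_no_ones 0 mp = [[]] := by
  rw [partitions_no_ones]
  simp

-- A's recursion as a flatten of maps
lemma A_flat (n : Int) (mp : Option Int) (h : n ≠ 0) :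
    partitions_no_ones n mp =
      ((PySem.List.pyRange (min n (mp.getD n)) 1 (-1)).map
        (fun i => (partitions_no_ones (n - i) (some i)).map (fun rest => i :: rest))).flatten := by
  rw [A_eq n mp h, PySem.List.foldl_append_eq_flatMap, List.nil_append, List.flatMap_def]

-- geometric bound: the pushed frames' weights sum below the popped frame's weight
lemma pvKey (r : Int) : ∀ (k : ℕ), (k : Int) ≤ r - 1 →
    ((PySem.List.pyRange 2 (2 + (k : Int)) 1).map (fun i => 2 ^ ((r - i).toNat + 1))).sum
      + 2 ^ ((r - 1 - (k : Int)).toNat + 1) ≤ 2 ^ (r.toNat + 1) := by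
  intro k
  induction k with
  | zero =>
    intro hk
    rw [show ((0:ℕ):Int) = 0 by simp]
    rw [show PySem.List.pyRange 2 (2 + 0) 1 = [] from PySem.List.pyRange_one_eq_nil (by omega)]
    simp only [List.map_nil, List.sum_nil, Nat.zero_add]
    exact Nat.pow_le_pow_right (by omega) (by omega)
  | succ k ih =>
    intro hk
    have hc : ((k + 1 : ℕ) : Int) = (k : Int) + 1 := by push_cast; ring
    rw [hc]
    have hsplit : PySem.List.pyRange 2 (2 + ((k : Int) + 1)) 1
        = PySem.List.pyRange 2 (2 + (k : Int)) 1 ++ [2 + (k : Int)] := by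
      rw [show (2 + ((k : Int) + 1)) = (2 + (k : Int)) + 1 by ring]
      exact PySem.List.pyRange_one_succ_right (by omega)
    rw [hsplit, List.map_append, List.sum_append]
    have hk' : (k : Int) ≤ r - 1 := by push_cast at hk; omega
    have e1 : (r - (2 + (k : Int))).toNat = (r - 2 - (k : Int)).toNat := by omega
    have e2 : (r - 1 - ((k : Int) + 1)).toNat = (r - 2 - (k : Int)).toNat := by omega
    have e3 : (r - 1 - (k : Int)).toNat = (r - 2 - (k : Int)).toNat + 1 := by omega
    have ih' := ih hk'
    rw [e3] at ih'
    simp only [List.map_cons, List.map_nil, List.sum_cons, List.sum_nil]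
    rw [e1, e2]
    have hp : 2 ^ ((r - 2 - (k : Int)).toNat + 1 + 1)
        = 2 ^ ((r - 2 - (k : Int)).toNat + 1) + 2 ^ ((r - 2 - (k : Int)).toNat + 1) := by
      rw [pow_succ]; ring
    omega

lemma pvPushSumLt (r c : Int) (hm2 : 2 ≤ min r c) :
    ((PySem.List.pyRange 2 (min r c + 1) 1).map (fun i => 2 ^ ((r - i).toNat + 1))).sum
      < 2 ^ (r.toNat + 1) := by
  have hmr : min r c ≤ r := min_le_left _ _
  have hk := pvKey r (min r c - 1).toNat (by omega)
  rw [show ((min r c - 1).toNat : Int) = min r c - 1 by omega] at hk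
  rw [show (2 + (min r c - 1)) = min r c + 1 by ring] at hk
  have hpos : 0 < 2 ^ ((r - 1 - (min r c - 1)).toNat + 1) := by positivity
  omega

lemma pvFuel_pos (r c : Int) : 1 ≤ pvFuel r c := by
  unfold pvFuel
  split
  · omega
  · exact Nat.one_le_two_pow

-- with enough fuel, the DFS loop emits, frame by frame, exactly the partitions A computes
-- under that frame's prefix
lemma dfs_spec : ∀ (fuel : ℕ) (stack : List (Int × Int × List Int)) (result : List (List Int)),
    (stack.map (fun f => pvFuel f.1 f.2.1)).sum < fuel →
    pvDfs fuel stack result = result ++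
      (stack.map (fun f => (partitions_no_ones f.1 (some f.2.1)).map
        (fun rest => f.2.2 ++ rest))).flatten := by
  intro fuel
  induction fuel with
  | zero => exact fun stack result h => absurd h (Nat.not_lt_zero _)
  | succ fuel ih =>
    intro stack result h
    match stack with
    | [] => simp [pvDfs]
    | (r, c, p) :: rest =>
      simp only [List.map_cons, List.sum_cons] at h
      rw [pvDfs]
      by_cases hr : r = 0
      · have h1 : pvFuel r c = 1 := by
          subst hr
          unfold pvFuel
          rw [if_pos (by omega)]
        rw [if_pos hr, ih rest (result ++ [p]) (by omega)]
        subst hr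
        simp only [List.map_cons, List.flatten_cons]
        rw [A_zero]
        simp
      · rw [if_neg hr]
        by_cases hm : min r c + 1 ≤ 2
        · rw [show PySem.List.pyRange 2 (min r c + 1) 1 = [] from PySem.List.pyRange_one_eq_nil hm]
          have h1 := pvFuel_pos r c
          simp only [List.reverse_nil, List.map_nil, List.nil_append]
          rw [ih rest result (by omega)]
          simp only [List.map_cons, List.flatten_cons]
          rw [A_flat r (some c) hr]
          simp only [Option.getD_some]
          rw [PySem.List.pyRange_neg_one_eq_nil (by omega)]
          simp
        · have hm2 : 2 ≤ min r c := by omega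
          have hw : pvFuel r c = 2 ^ (r.toNat + 1) := by
            unfold pvFuel
            rw [if_neg (by omega)]
          have hpush : ((PySem.List.pyRange 2 (min r c + 1) 1).map (fun i => pvFuel (r - i) i)).sum
              ≤ ((PySem.List.pyRange 2 (min r c + 1) 1).map (fun i => 2 ^ ((r - i).toNat + 1))).sum := by
            apply List.sum_le_sum
            intro i hi
            unfold pvFuel
            split
            · exact Nat.one_le_two_pow
            · exact le_rfl
          have hlt := pvPushSumLt r c hm2
          rw [ih _ result ?_]
          · congr 1
            rw [List.map_append, List.flatten_append, List.map_cons, List.flatten_cons]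
            congr 1
            have hrev : PySem.List.pyRange (min r c) 1 (-1) = (PySem.List.pyRange 2 (min r c + 1) 1).reverse := by
              rw [PySem.List.pyRange_neg_one_eq_reverse]
              norm_num
            rw [A_flat r (some c) hr]
            simp only [Option.getD_some]
            rw [hrev, List.map_flatten, List.map_map, List.map_map]
            congr 1
            apply List.map_congr_left
            intro i _
            simp
          · simp only [List.map_append, List.sum_append, List.map_reverse, List.sum_reverse,
              List.map_map, Function.comp_def]
            omega

lemma main_eq (n : Int) (mp : Option Int) :
    partitions_no_ones n mp = partitions_no_ones_alt n mp := by
  unfold partitions_no_ones_alt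
  rw [dfs_spec _ _ _ (by simp [List.map_cons, List.sum_cons])]
  simp only [List.map_cons, List.map_nil, List.flatten_cons, List.flatten_nil,
    List.nil_append, List.append_nil]
  by_cases h0 : n = 0
  · subst h0
    rw [A_zero, A_zero]
    simp
  · rw [A_eq n mp h0, A_eq n (some (mp.getD n)) h0]
    simp

-- ===== VERDICT (by name: the statement is the Claim_ definition above) =====
theorem partitions_no_ones_spec : Claim_equal_partitions_no_ones := by
  intro n mp _ _
  exact main_eq n mp
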